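-- pv_equiv track=rewrite | github.com/SixtusTheSixth/ultimate-tic-tac-toe-ai | old_standalone/ultimate.py | about_to_win
-- ===== SOURCE A (Python) =====
-- def about_to_win(board_exc, cur_player):
-- 	# return true if cur_player (1 for x, 2 for o) is about to win the square
-- 	# given a 3x3 sub-array representing the board squares (so 'x', 'o', and ' ' as values) we're checking
-- 	us = 'xo'[cur_player - 1]
-- 	bf = ''.join(''.join(r) for r in board_exc) # bf for board_flat, flattened string version of board_exc
--
-- 	def row_almost(s):
-- 		# does the current player have 2 spots in the 3-character string representation of a given row and is the last spot available
-- 		return s.count(us) == 2 and s.count(' ') == 1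
--
-- 	return row_almost(bf[0:3]) or row_almost(bf[3:6]) or row_almost(bf[6:9]) or \
-- 		row_almost(bf[0:7:3]) or row_almost(bf[1:8:3]) or row_almost(bf[2:9:3]) or \
-- 		row_almost(bf[0:9:4]) or row_almost(bf[2:7:2])
-- ===== SOURCE B (Python) =====
-- def about_to_win(board_exc, cur_player):
-- 	# Scan the open squares: the player is about to win iff placing their mark on
-- 	# some blank cell completes one of the 8 winning lines.
-- 	us = 'xo'[cur_player - 1]
-- 	bf = ''.join(''.join(r) for r in board_exc)
-- 	lines = ((0, 1, 2), (3, 4, 5), (6, 7, 8), (0, 3, 6), (1, 4, 7), (2, 5, 8), (0, 4, 8), (2, 4, 6))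
-- 	for i, c in enumerate(bf):
-- 		if c == ' ':
-- 			for line in lines:
-- 				if i in line and all(bf[j] == us for j in line if j != i):
-- 					return True
-- 	return False
-- ===== Notes on version B (the rewrite author's own statement) =====
-- stated objective: alternative
-- what changed: B scans the blank squares of the flattened board and tests whether some winning line through the blank has both other cells owned by the player, instead of A's counting of 2-mark/1-blank patterns in each of the 8 sliced lines; Pre_ additionally excludes boards flattening to fewer than 9 cells, where A's lenient slices still return a value but B's direct indexing can raise IndexError.
-- outside the precondition, e.g. on about_to_win([[' ']], 1): A returns False, B raises IndexError
import Mathlib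
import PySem

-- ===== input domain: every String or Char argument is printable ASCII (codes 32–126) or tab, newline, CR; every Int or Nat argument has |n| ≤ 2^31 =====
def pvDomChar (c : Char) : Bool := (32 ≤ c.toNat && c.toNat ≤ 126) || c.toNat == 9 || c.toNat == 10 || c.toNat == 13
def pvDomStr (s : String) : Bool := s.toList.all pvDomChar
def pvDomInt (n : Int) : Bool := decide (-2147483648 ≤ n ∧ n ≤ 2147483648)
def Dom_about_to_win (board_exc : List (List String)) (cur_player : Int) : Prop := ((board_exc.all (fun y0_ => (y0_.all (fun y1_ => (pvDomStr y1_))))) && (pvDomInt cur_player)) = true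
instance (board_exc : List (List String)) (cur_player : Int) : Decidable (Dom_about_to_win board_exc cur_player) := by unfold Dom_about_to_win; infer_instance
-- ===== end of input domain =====

-- B scans the blank squares and tests whether a winning line through the blank is completed by
-- the player's mark, instead of A's counting of 2-mark/1-blank patterns over the 8 line slices
-- (objective: alternative decomposition).

-- ===== PORT A =====
-- bf = ''.join(''.join(r) for r in board_exc): joining with the empty separator is concatenation,
-- ported exactly as flatten over the rows' character lists (shared by both ports, which build bf
-- with the identical Python line).
def pvFlat (board_exc : List (List String)) : List Char :=
  (board_exc.map (fun r => (r.map String.toList).flatten)).flatten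

-- def row_almost(s): return s.count(us) == 2 and s.count(' ') == 1
def pvRowAlmost (us : Char) (s : List Char) : Bool :=
  PySem.List.count s us == 2 && PySem.List.count s ' ' == 1

-- the final or-chain of A over the 8 slices; slice? never returns none here (its step is a
-- non-zero literal), so '.getD []' is exact
def pvACore (us : Char) (bf : List Char) : Bool :=
  pvRowAlmost us (PySem.List.slice bf (some 0) (some 3)) ||
  pvRowAlmost us (PySem.List.slice bf (some 3) (some 6)) ||
  pvRowAlmost us (PySem.List.slice bf (some 6) (some 9)) ||
  pvRowAlmost us ((PySem.List.slice? bf (some 0) (some 7) 3).getD []) ||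
  pvRowAlmost us ((PySem.List.slice? bf (some 1) (some 8) 3).getD []) ||
  pvRowAlmost us ((PySem.List.slice? bf (some 2) (some 9) 3).getD []) ||
  pvRowAlmost us ((PySem.List.slice? bf (some 0) (some 9) 4).getD []) ||
  pvRowAlmost us ((PySem.List.slice? bf (some 2) (some 7) 2).getD [])

-- us = 'xo'[cur_player - 1]; none = IndexError, excluded by Pre_
def about_to_win (board_exc : List (List String)) (cur_player : Int) : Bool :=
  match PySem.Str.pyGet? "xo" (cur_player - 1) with
  | none => false
  | some us => pvACore us (pvFlat board_exc)

-- ===== PORT B =====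
def pvLines : List (Int × Int × Int) :=
  [(0,1,2),(3,4,5),(6,7,8),(0,3,6),(1,4,7),(2,5,8),(0,4,8),(2,4,6)]

-- 'i in line'
def pvLineMem (i : Int) (l : Int × Int × Int) : Bool :=
  l.1 == i || l.2.1 == i || l.2.2 == i

-- 'all(bf[j] == us for j in line if j != i)'; bf[j] is in range under Pre_ (flat length ≥ 9),
-- so pyGet? returns some there
def pvOthersAll (us : Char) (bf : List Char) (i : Int) (l : Int × Int × Int) : Bool :=
  ([l.1, l.2.1, l.2.2].filter (fun j => j != i)).all
    (fun j => PySem.List.pyGet? bf j == some us)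

-- 'for i, c in enumerate(bf): if c == ' ': for line in lines: … return True' as any/any
def pvBCore (us : Char) (bf : List Char) : Bool :=
  (PySem.List.enumerate bf).any (fun ic =>
    ic.2 == ' ' && pvLines.any (fun l => pvLineMem ic.1 l && pvOthersAll us bf ic.1 l))

def about_to_win_alt (board_exc : List (List String)) (cur_player : Int) : Bool :=
  match PySem.Str.pyGet? "xo" (cur_player - 1) with
  | none => false
  | some us => pvBCore us (pvFlat board_exc)

-- ===== PRECONDITION & SPEC =====
-- Pre_ excludes (a) cur_player outside -1..2, where A's 'xo'[cur_player-1] raises IndexError, and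
-- (b) boards flattening to fewer than 9 cells: A's lenient slices still return a value on such
-- malformed boards, while B's direct indexing bf[j] can raise IndexError there.
def Pre_about_to_win (board_exc : List (List String)) (cur_player : Int) : Prop :=
  -1 ≤ cur_player ∧ cur_player ≤ 2 ∧
  9 ≤ ((board_exc.map (fun r => (r.map (fun s => s.toList.length)).sum)).sum)
instance (board_exc : List (List String)) (cur_player : Int) : Decidable (Pre_about_to_win board_exc cur_player) := by unfold Pre_about_to_win; infer_instance

def pvWitness_about_to_win : List (List String) × Int := ([["xx "], ["ooo"], ["   "]], 1)

def Spec_about_to_win (board_exc : List (List String)) (cur_player : Int) (out : Bool) : Prop := out = about_to_win_alt board_exc cur_player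
instance (board_exc : List (List String)) (cur_player : Int) (out : Bool) : Decidable (Spec_about_to_win board_exc cur_player out) := by unfold Spec_about_to_win; infer_instance

-- ===== CLAIM =====
def Claim_equal_about_to_win : Prop := ∀ (board_exc : List (List String)) (cur_player : Int), Dom_about_to_win board_exc cur_player → Pre_about_to_win board_exc cur_player → Spec_about_to_win board_exc cur_player (about_to_win board_exc cur_player)

-- ===== LEMMAS AND PROOFS =====

-- the Pre_ length sum is the length of the flattened board
lemma pvFlat_length (board_exc : List (List String)) :
    (pvFlat board_exc).length = ((board_exc.map (fun r => (r.map (fun s => s.toList.length)).sum)).sum) := by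
  simp [pvFlat, List.length_flatten, Function.comp_def]

-- row_almost on a 3-character line, for a mark that is not the blank: exactly one cell is blank
-- and the other two carry the mark
lemma pvRowAlmost_three (us a b c : Char) (h : us ≠ ' ') :
    pvRowAlmost us [a,b,c] =
      ((a == ' ' && (b == us && c == us)) || ((b == ' ' && (a == us && c == us)) || (c == ' ' && (a == us && b == us)))) := by
  have h' : ¬ (' ' = us) := fun e => h e.symm
  simp only [pvRowAlmost, PySem.List.count_eq]
  by_cases ha : a = us <;> by_cases hb : b = us <;> by_cases hc : c = us <;>
    by_cases ha' : a = ' ' <;> by_cases hb' : b = ' ' <;> by_cases hc' : c = ' ' <;>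
    simp_all

-- indices ≥ 9 lie on no winning line
lemma pvLineMem_ge_nine (l : Int × Int × Int) (hl : l ∈ pvLines) (i : Int) (hi : 9 ≤ i) :
    pvLineMem i l = false := by
  fin_cases hl <;> simp [pvLineMem] <;> omega

-- evaluation lemmas for B's inner line scan at each board index (used by pvCore_eq below)
set_option maxHeartbeats 1000000 in
lemma pvB0 (us : Char) (c0 c1 c2 c3 c4 c5 c6 c7 c8 : Char) (rest : List Char) :
    pvLines.any (fun l => pvLineMem (0:Int) l && pvOthersAll us (c0::c1::c2::c3::c4::c5::c6::c7::c8::rest) (0:Int) l) = ((c1 == us && c2 == us) || ((c3 == us && c6 == us) || (c4 == us && c8 == us))) := by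
  have g0 : PySem.List.pyGet? (c0::c1::c2::c3::c4::c5::c6::c7::c8::rest) (0:Int) = some c0 := by
    rw [PySem.List.pyGet?_of_nonneg _ (by norm_num)]; rfl
  have g1 : PySem.List.pyGet? (c0::c1::c2::c3::c4::c5::c6::c7::c8::rest) (1:Int) = some c1 := by
    rw [PySem.List.pyGet?_of_nonneg _ (by norm_num)]; rfl
  have g2 : PySem.List.pyGet? (c0::c1::c2::c3::c4::c5::c6::c7::c8::rest) (2:Int) = some c2 := by
    rw [PySem.List.pyGet?_of_nonneg _ (by norm_num)]; rfl
  have g3 : PySem.List.pyGet? (c0::c1::c2::c3::c4::c5::c6::c7::c8::rest) (3:Int) = some c3 := by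
    rw [PySem.List.pyGet?_of_nonneg _ (by norm_num)]; rfl
  have g4 : PySem.List.pyGet? (c0::c1::c2::c3::c4::c5::c6::c7::c8::rest) (4:Int) = some c4 := by
    rw [PySem.List.pyGet?_of_nonneg _ (by norm_num)]; rfl
  have g5 : PySem.List.pyGet? (c0::c1::c2::c3::c4::c5::c6::c7::c8::rest) (5:Int) = some c5 := by
    rw [PySem.List.pyGet?_of_nonneg _ (by norm_num)]; rfl
  have g6 : PySem.List.pyGet? (c0::c1::c2::c3::c4::c5::c6::c7::c8::rest) (6:Int) = some c6 := by
    rw [PySem.List.pyGet?_of_nonneg _ (by norm_num)]; rfl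
  have g7 : PySem.List.pyGet? (c0::c1::c2::c3::c4::c5::c6::c7::c8::rest) (7:Int) = some c7 := by
    rw [PySem.List.pyGet?_of_nonneg _ (by norm_num)]; rfl
  have g8 : PySem.List.pyGet? (c0::c1::c2::c3::c4::c5::c6::c7::c8::rest) (8:Int) = some c8 := by
    rw [PySem.List.pyGet?_of_nonneg _ (by norm_num)]; rfl
  simp only [pvLines, pvLineMem, pvOthersAll, List.any_cons, List.any_nil]
  simp only [show ∀ a b : Int, (a == b) = decide (a = b) from fun a b => rfl]
  norm_num [g0, g1, g2, g3, g4, g5, g6, g7, g8]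
  try simp only [Bool.or_assoc]

set_option maxHeartbeats 1000000 in
lemma pvB1 (us : Char) (c0 c1 c2 c3 c4 c5 c6 c7 c8 : Char) (rest : List Char) :
    pvLines.any (fun l => pvLineMem (1:Int) l && pvOthersAll us (c0::c1::c2::c3::c4::c5::c6::c7::c8::rest) (1:Int) l) = ((c0 == us && c2 == us) || (c4 == us && c7 == us)) := by
  have g0 : PySem.List.pyGet? (c0::c1::c2::c3::c4::c5::c6::c7::c8::rest) (0:Int) = some c0 := by
    rw [PySem.List.pyGet?_of_nonneg _ (by norm_num)]; rfl
  have g1 : PySem.List.pyGet? (c0::c1::c2::c3::c4::c5::c6::c7::c8::rest) (1:Int) = some c1 := by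
    rw [PySem.List.pyGet?_of_nonneg _ (by norm_num)]; rfl
  have g2 : PySem.List.pyGet? (c0::c1::c2::c3::c4::c5::c6::c7::c8::rest) (2:Int) = some c2 := by
    rw [PySem.List.pyGet?_of_nonneg _ (by norm_num)]; rfl
  have g3 : PySem.List.pyGet? (c0::c1::c2::c3::c4::c5::c6::c7::c8::rest) (3:Int) = some c3 := by
    rw [PySem.List.pyGet?_of_nonneg _ (by norm_num)]; rfl
  have g4 : PySem.List.pyGet? (c0::c1::c2::c3::c4::c5::c6::c7::c8::rest) (4:Int) = some c4 := by
    rw [PySem.List.pyGet?_of_nonneg _ (by norm_num)]; rfl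
  have g5 : PySem.List.pyGet? (c0::c1::c2::c3::c4::c5::c6::c7::c8::rest) (5:Int) = some c5 := by
    rw [PySem.List.pyGet?_of_nonneg _ (by norm_num)]; rfl
  have g6 : PySem.List.pyGet? (c0::c1::c2::c3::c4::c5::c6::c7::c8::rest) (6:Int) = some c6 := by
    rw [PySem.List.pyGet?_of_nonneg _ (by norm_num)]; rfl
  have g7 : PySem.List.pyGet? (c0::c1::c2::c3::c4::c5::c6::c7::c8::rest) (7:Int) = some c7 := by
    rw [PySem.List.pyGet?_of_nonneg _ (by norm_num)]; rfl
  have g8 : PySem.List.pyGet? (c0::c1::c2::c3::c4::c5::c6::c7::c8::rest) (8:Int) = some c8 := by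
    rw [PySem.List.pyGet?_of_nonneg _ (by norm_num)]; rfl
  simp only [pvLines, pvLineMem, pvOthersAll, List.any_cons, List.any_nil]
  simp only [show ∀ a b : Int, (a == b) = decide (a = b) from fun a b => rfl]
  norm_num [g0, g1, g2, g3, g4, g5, g6, g7, g8]
  try simp only [Bool.or_assoc]

set_option maxHeartbeats 1000000 in
lemma pvB2 (us : Char) (c0 c1 c2 c3 c4 c5 c6 c7 c8 : Char) (rest : List Char) :
    pvLines.any (fun l => pvLineMem (2:Int) l && pvOthersAll us (c0::c1::c2::c3::c4::c5::c6::c7::c8::rest) (2:Int) l) = ((c0 == us && c1 == us) || ((c5 == us && c8 == us) || (c4 == us && c6 == us))) := by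
  have g0 : PySem.List.pyGet? (c0::c1::c2::c3::c4::c5::c6::c7::c8::rest) (0:Int) = some c0 := by
    rw [PySem.List.pyGet?_of_nonneg _ (by norm_num)]; rfl
  have g1 : PySem.List.pyGet? (c0::c1::c2::c3::c4::c5::c6::c7::c8::rest) (1:Int) = some c1 := by
    rw [PySem.List.pyGet?_of_nonneg _ (by norm_num)]; rfl
  have g2 : PySem.List.pyGet? (c0::c1::c2::c3::c4::c5::c6::c7::c8::rest) (2:Int) = some c2 := by
    rw [PySem.List.pyGet?_of_nonneg _ (by norm_num)]; rfl
  have g3 : PySem.List.pyGet? (c0::c1::c2::c3::c4::c5::c6::c7::c8::rest) (3:Int) = some c3 := by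
    rw [PySem.List.pyGet?_of_nonneg _ (by norm_num)]; rfl
  have g4 : PySem.List.pyGet? (c0::c1::c2::c3::c4::c5::c6::c7::c8::rest) (4:Int) = some c4 := by
    rw [PySem.List.pyGet?_of_nonneg _ (by norm_num)]; rfl
  have g5 : PySem.List.pyGet? (c0::c1::c2::c3::c4::c5::c6::c7::c8::rest) (5:Int) = some c5 := by
    rw [PySem.List.pyGet?_of_nonneg _ (by norm_num)]; rfl
  have g6 : PySem.List.pyGet? (c0::c1::c2::c3::c4::c5::c6::c7::c8::rest) (6:Int) = some c6 := by
    rw [PySem.List.pyGet?_of_nonneg _ (by norm_num)]; rfl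
  have g7 : PySem.List.pyGet? (c0::c1::c2::c3::c4::c5::c6::c7::c8::rest) (7:Int) = some c7 := by
    rw [PySem.List.pyGet?_of_nonneg _ (by norm_num)]; rfl
  have g8 : PySem.List.pyGet? (c0::c1::c2::c3::c4::c5::c6::c7::c8::rest) (8:Int) = some c8 := by
    rw [PySem.List.pyGet?_of_nonneg _ (by norm_num)]; rfl
  simp only [pvLines, pvLineMem, pvOthersAll, List.any_cons, List.any_nil]
  simp only [show ∀ a b : Int, (a == b) = decide (a = b) from fun a b => rfl]
  norm_num [g0, g1, g2, g3, g4, g5, g6, g7, g8]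
  try simp only [Bool.or_assoc]

set_option maxHeartbeats 1000000 in
lemma pvB3 (us : Char) (c0 c1 c2 c3 c4 c5 c6 c7 c8 : Char) (rest : List Char) :
    pvLines.any (fun l => pvLineMem (3:Int) l && pvOthersAll us (c0::c1::c2::c3::c4::c5::c6::c7::c8::rest) (3:Int) l) = ((c4 == us && c5 == us) || (c0 == us && c6 == us)) := by
  have g0 : PySem.List.pyGet? (c0::c1::c2::c3::c4::c5::c6::c7::c8::rest) (0:Int) = some c0 := by
    rw [PySem.List.pyGet?_of_nonneg _ (by norm_num)]; rfl
  have g1 : PySem.List.pyGet? (c0::c1::c2::c3::c4::c5::c6::c7::c8::rest) (1:Int) = some c1 := by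
    rw [PySem.List.pyGet?_of_nonneg _ (by norm_num)]; rfl
  have g2 : PySem.List.pyGet? (c0::c1::c2::c3::c4::c5::c6::c7::c8::rest) (2:Int) = some c2 := by
    rw [PySem.List.pyGet?_of_nonneg _ (by norm_num)]; rfl
  have g3 : PySem.List.pyGet? (c0::c1::c2::c3::c4::c5::c6::c7::c8::rest) (3:Int) = some c3 := by
    rw [PySem.List.pyGet?_of_nonneg _ (by norm_num)]; rfl
  have g4 : PySem.List.pyGet? (c0::c1::c2::c3::c4::c5::c6::c7::c8::rest) (4:Int) = some c4 := by
    rw [PySem.List.pyGet?_of_nonneg _ (by norm_num)]; rfl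
  have g5 : PySem.List.pyGet? (c0::c1::c2::c3::c4::c5::c6::c7::c8::rest) (5:Int) = some c5 := by
    rw [PySem.List.pyGet?_of_nonneg _ (by norm_num)]; rfl
  have g6 : PySem.List.pyGet? (c0::c1::c2::c3::c4::c5::c6::c7::c8::rest) (6:Int) = some c6 := by
    rw [PySem.List.pyGet?_of_nonneg _ (by norm_num)]; rfl
  have g7 : PySem.List.pyGet? (c0::c1::c2::c3::c4::c5::c6::c7::c8::rest) (7:Int) = some c7 := by
    rw [PySem.List.pyGet?_of_nonneg _ (by norm_num)]; rfl
  have g8 : PySem.List.pyGet? (c0::c1::c2::c3::c4::c5::c6::c7::c8::rest) (8:Int) = some c8 := by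
    rw [PySem.List.pyGet?_of_nonneg _ (by norm_num)]; rfl
  simp only [pvLines, pvLineMem, pvOthersAll, List.any_cons, List.any_nil]
  simp only [show ∀ a b : Int, (a == b) = decide (a = b) from fun a b => rfl]
  norm_num [g0, g1, g2, g3, g4, g5, g6, g7, g8]
  try simp only [Bool.or_assoc]

set_option maxHeartbeats 1000000 in
lemma pvB4 (us : Char) (c0 c1 c2 c3 c4 c5 c6 c7 c8 : Char) (rest : List Char) :
    pvLines.any (fun l => pvLineMem (4:Int) l && pvOthersAll us (c0::c1::c2::c3::c4::c5::c6::c7::c8::rest) (4:Int) l) = ((c3 == us && c5 == us) || ((c1 == us && c7 == us) || ((c0 == us && c8 == us) || (c2 == us && c6 == us)))) := by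
  have g0 : PySem.List.pyGet? (c0::c1::c2::c3::c4::c5::c6::c7::c8::rest) (0:Int) = some c0 := by
    rw [PySem.List.pyGet?_of_nonneg _ (by norm_num)]; rfl
  have g1 : PySem.List.pyGet? (c0::c1::c2::c3::c4::c5::c6::c7::c8::rest) (1:Int) = some c1 := by
    rw [PySem.List.pyGet?_of_nonneg _ (by norm_num)]; rfl
  have g2 : PySem.List.pyGet? (c0::c1::c2::c3::c4::c5::c6::c7::c8::rest) (2:Int) = some c2 := by
    rw [PySem.List.pyGet?_of_nonneg _ (by norm_num)]; rfl
  have g3 : PySem.List.pyGet? (c0::c1::c2::c3::c4::c5::c6::c7::c8::rest) (3:Int) = some c3 := by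
    rw [PySem.List.pyGet?_of_nonneg _ (by norm_num)]; rfl
  have g4 : PySem.List.pyGet? (c0::c1::c2::c3::c4::c5::c6::c7::c8::rest) (4:Int) = some c4 := by
    rw [PySem.List.pyGet?_of_nonneg _ (by norm_num)]; rfl
  have g5 : PySem.List.pyGet? (c0::c1::c2::c3::c4::c5::c6::c7::c8::rest) (5:Int) = some c5 := by
    rw [PySem.List.pyGet?_of_nonneg _ (by norm_num)]; rfl
  have g6 : PySem.List.pyGet? (c0::c1::c2::c3::c4::c5::c6::c7::c8::rest) (6:Int) = some c6 := by
    rw [PySem.List.pyGet?_of_nonneg _ (by norm_num)]; rfl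
  have g7 : PySem.List.pyGet? (c0::c1::c2::c3::c4::c5::c6::c7::c8::rest) (7:Int) = some c7 := by
    rw [PySem.List.pyGet?_of_nonneg _ (by norm_num)]; rfl
  have g8 : PySem.List.pyGet? (c0::c1::c2::c3::c4::c5::c6::c7::c8::rest) (8:Int) = some c8 := by
    rw [PySem.List.pyGet?_of_nonneg _ (by norm_num)]; rfl
  simp only [pvLines, pvLineMem, pvOthersAll, List.any_cons, List.any_nil]
  simp only [show ∀ a b : Int, (a == b) = decide (a = b) from fun a b => rfl]
  norm_num [g0, g1, g2, g3, g4, g5, g6, g7, g8]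
  try simp only [Bool.or_assoc]

set_option maxHeartbeats 1000000 in
lemma pvB5 (us : Char) (c0 c1 c2 c3 c4 c5 c6 c7 c8 : Char) (rest : List Char) :
    pvLines.any (fun l => pvLineMem (5:Int) l && pvOthersAll us (c0::c1::c2::c3::c4::c5::c6::c7::c8::rest) (5:Int) l) = ((c3 == us && c4 == us) || (c2 == us && c8 == us)) := by
  have g0 : PySem.List.pyGet? (c0::c1::c2::c3::c4::c5::c6::c7::c8::rest) (0:Int) = some c0 := by
    rw [PySem.List.pyGet?_of_nonneg _ (by norm_num)]; rfl
  have g1 : PySem.List.pyGet? (c0::c1::c2::c3::c4::c5::c6::c7::c8::rest) (1:Int) = some c1 := by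
    rw [PySem.List.pyGet?_of_nonneg _ (by norm_num)]; rfl
  have g2 : PySem.List.pyGet? (c0::c1::c2::c3::c4::c5::c6::c7::c8::rest) (2:Int) = some c2 := by
    rw [PySem.List.pyGet?_of_nonneg _ (by norm_num)]; rfl
  have g3 : PySem.List.pyGet? (c0::c1::c2::c3::c4::c5::c6::c7::c8::rest) (3:Int) = some c3 := by
    rw [PySem.List.pyGet?_of_nonneg _ (by norm_num)]; rfl
  have g4 : PySem.List.pyGet? (c0::c1::c2::c3::c4::c5::c6::c7::c8::rest) (4:Int) = some c4 := by
    rw [PySem.List.pyGet?_of_nonneg _ (by norm_num)]; rfl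
  have g5 : PySem.List.pyGet? (c0::c1::c2::c3::c4::c5::c6::c7::c8::rest) (5:Int) = some c5 := by
    rw [PySem.List.pyGet?_of_nonneg _ (by norm_num)]; rfl
  have g6 : PySem.List.pyGet? (c0::c1::c2::c3::c4::c5::c6::c7::c8::rest) (6:Int) = some c6 := by
    rw [PySem.List.pyGet?_of_nonneg _ (by norm_num)]; rfl
  have g7 : PySem.List.pyGet? (c0::c1::c2::c3::c4::c5::c6::c7::c8::rest) (7:Int) = some c7 := by
    rw [PySem.List.pyGet?_of_nonneg _ (by norm_num)]; rfl
  have g8 : PySem.List.pyGet? (c0::c1::c2::c3::c4::c5::c6::c7::c8::rest) (8:Int) = some c8 := by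
    rw [PySem.List.pyGet?_of_nonneg _ (by norm_num)]; rfl
  simp only [pvLines, pvLineMem, pvOthersAll, List.any_cons, List.any_nil]
  simp only [show ∀ a b : Int, (a == b) = decide (a = b) from fun a b => rfl]
  norm_num [g0, g1, g2, g3, g4, g5, g6, g7, g8]
  try simp only [Bool.or_assoc]

set_option maxHeartbeats 1000000 in
lemma pvB6 (us : Char) (c0 c1 c2 c3 c4 c5 c6 c7 c8 : Char) (rest : List Char) :
    pvLines.any (fun l => pvLineMem (6:Int) l && pvOthersAll us (c0::c1::c2::c3::c4::c5::c6::c7::c8::rest) (6:Int) l) = ((c7 == us && c8 == us) || ((c0 == us && c3 == us) || (c2 == us && c4 == us))) := by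
  have g0 : PySem.List.pyGet? (c0::c1::c2::c3::c4::c5::c6::c7::c8::rest) (0:Int) = some c0 := by
    rw [PySem.List.pyGet?_of_nonneg _ (by norm_num)]; rfl
  have g1 : PySem.List.pyGet? (c0::c1::c2::c3::c4::c5::c6::c7::c8::rest) (1:Int) = some c1 := by
    rw [PySem.List.pyGet?_of_nonneg _ (by norm_num)]; rfl
  have g2 : PySem.List.pyGet? (c0::c1::c2::c3::c4::c5::c6::c7::c8::rest) (2:Int) = some c2 := by
    rw [PySem.List.pyGet?_of_nonneg _ (by norm_num)]; rfl
  have g3 : PySem.List.pyGet? (c0::c1::c2::c3::c4::c5::c6::c7::c8::rest) (3:Int) = some c3 := by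
    rw [PySem.List.pyGet?_of_nonneg _ (by norm_num)]; rfl
  have g4 : PySem.List.pyGet? (c0::c1::c2::c3::c4::c5::c6::c7::c8::rest) (4:Int) = some c4 := by
    rw [PySem.List.pyGet?_of_nonneg _ (by norm_num)]; rfl
  have g5 : PySem.List.pyGet? (c0::c1::c2::c3::c4::c5::c6::c7::c8::rest) (5:Int) = some c5 := by
    rw [PySem.List.pyGet?_of_nonneg _ (by norm_num)]; rfl
  have g6 : PySem.List.pyGet? (c0::c1::c2::c3::c4::c5::c6::c7::c8::rest) (6:Int) = some c6 := by
    rw [PySem.List.pyGet?_of_nonneg _ (by norm_num)]; rfl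
  have g7 : PySem.List.pyGet? (c0::c1::c2::c3::c4::c5::c6::c7::c8::rest) (7:Int) = some c7 := by
    rw [PySem.List.pyGet?_of_nonneg _ (by norm_num)]; rfl
  have g8 : PySem.List.pyGet? (c0::c1::c2::c3::c4::c5::c6::c7::c8::rest) (8:Int) = some c8 := by
    rw [PySem.List.pyGet?_of_nonneg _ (by norm_num)]; rfl
  simp only [pvLines, pvLineMem, pvOthersAll, List.any_cons, List.any_nil]
  simp only [show ∀ a b : Int, (a == b) = decide (a = b) from fun a b => rfl]
  norm_num [g0, g1, g2, g3, g4, g5, g6, g7, g8]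
  try simp only [Bool.or_assoc]

set_option maxHeartbeats 1000000 in
lemma pvB7 (us : Char) (c0 c1 c2 c3 c4 c5 c6 c7 c8 : Char) (rest : List Char) :
    pvLines.any (fun l => pvLineMem (7:Int) l && pvOthersAll us (c0::c1::c2::c3::c4::c5::c6::c7::c8::rest) (7:Int) l) = ((c6 == us && c8 == us) || (c1 == us && c4 == us)) := by
  have g0 : PySem.List.pyGet? (c0::c1::c2::c3::c4::c5::c6::c7::c8::rest) (0:Int) = some c0 := by
    rw [PySem.List.pyGet?_of_nonneg _ (by norm_num)]; rfl
  have g1 : PySem.List.pyGet? (c0::c1::c2::c3::c4::c5::c6::c7::c8::rest) (1:Int) = some c1 := by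
    rw [PySem.List.pyGet?_of_nonneg _ (by norm_num)]; rfl
  have g2 : PySem.List.pyGet? (c0::c1::c2::c3::c4::c5::c6::c7::c8::rest) (2:Int) = some c2 := by
    rw [PySem.List.pyGet?_of_nonneg _ (by norm_num)]; rfl
  have g3 : PySem.List.pyGet? (c0::c1::c2::c3::c4::c5::c6::c7::c8::rest) (3:Int) = some c3 := by
    rw [PySem.List.pyGet?_of_nonneg _ (by norm_num)]; rfl
  have g4 : PySem.List.pyGet? (c0::c1::c2::c3::c4::c5::c6::c7::c8::rest) (4:Int) = some c4 := by
    rw [PySem.List.pyGet?_of_nonneg _ (by norm_num)]; rfl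
  have g5 : PySem.List.pyGet? (c0::c1::c2::c3::c4::c5::c6::c7::c8::rest) (5:Int) = some c5 := by
    rw [PySem.List.pyGet?_of_nonneg _ (by norm_num)]; rfl
  have g6 : PySem.List.pyGet? (c0::c1::c2::c3::c4::c5::c6::c7::c8::rest) (6:Int) = some c6 := by
    rw [PySem.List.pyGet?_of_nonneg _ (by norm_num)]; rfl
  have g7 : PySem.List.pyGet? (c0::c1::c2::c3::c4::c5::c6::c7::c8::rest) (7:Int) = some c7 := by
    rw [PySem.List.pyGet?_of_nonneg _ (by norm_num)]; rfl
  have g8 : PySem.List.pyGet? (c0::c1::c2::c3::c4::c5::c6::c7::c8::rest) (8:Int) = some c8 := by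
    rw [PySem.List.pyGet?_of_nonneg _ (by norm_num)]; rfl
  simp only [pvLines, pvLineMem, pvOthersAll, List.any_cons, List.any_nil]
  simp only [show ∀ a b : Int, (a == b) = decide (a = b) from fun a b => rfl]
  norm_num [g0, g1, g2, g3, g4, g5, g6, g7, g8]
  try simp only [Bool.or_assoc]

set_option maxHeartbeats 1000000 in
lemma pvB8 (us : Char) (c0 c1 c2 c3 c4 c5 c6 c7 c8 : Char) (rest : List Char) :
    pvLines.any (fun l => pvLineMem (8:Int) l && pvOthersAll us (c0::c1::c2::c3::c4::c5::c6::c7::c8::rest) (8:Int) l) = ((c6 == us && c7 == us) || ((c2 == us && c5 == us) || (c0 == us && c4 == us))) := by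
  have g0 : PySem.List.pyGet? (c0::c1::c2::c3::c4::c5::c6::c7::c8::rest) (0:Int) = some c0 := by
    rw [PySem.List.pyGet?_of_nonneg _ (by norm_num)]; rfl
  have g1 : PySem.List.pyGet? (c0::c1::c2::c3::c4::c5::c6::c7::c8::rest) (1:Int) = some c1 := by
    rw [PySem.List.pyGet?_of_nonneg _ (by norm_num)]; rfl
  have g2 : PySem.List.pyGet? (c0::c1::c2::c3::c4::c5::c6::c7::c8::rest) (2:Int) = some c2 := by
    rw [PySem.List.pyGet?_of_nonneg _ (by norm_num)]; rfl
  have g3 : PySem.List.pyGet? (c0::c1::c2::c3::c4::c5::c6::c7::c8::rest) (3:Int) = some c3 := by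
    rw [PySem.List.pyGet?_of_nonneg _ (by norm_num)]; rfl
  have g4 : PySem.List.pyGet? (c0::c1::c2::c3::c4::c5::c6::c7::c8::rest) (4:Int) = some c4 := by
    rw [PySem.List.pyGet?_of_nonneg _ (by norm_num)]; rfl
  have g5 : PySem.List.pyGet? (c0::c1::c2::c3::c4::c5::c6::c7::c8::rest) (5:Int) = some c5 := by
    rw [PySem.List.pyGet?_of_nonneg _ (by norm_num)]; rfl
  have g6 : PySem.List.pyGet? (c0::c1::c2::c3::c4::c5::c6::c7::c8::rest) (6:Int) = some c6 := by
    rw [PySem.List.pyGet?_of_nonneg _ (by norm_num)]; rfl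
  have g7 : PySem.List.pyGet? (c0::c1::c2::c3::c4::c5::c6::c7::c8::rest) (7:Int) = some c7 := by
    rw [PySem.List.pyGet?_of_nonneg _ (by norm_num)]; rfl
  have g8 : PySem.List.pyGet? (c0::c1::c2::c3::c4::c5::c6::c7::c8::rest) (8:Int) = some c8 := by
    rw [PySem.List.pyGet?_of_nonneg _ (by norm_num)]; rfl
  simp only [pvLines, pvLineMem, pvOthersAll, List.any_cons, List.any_nil]
  simp only [show ∀ a b : Int, (a == b) = decide (a = b) from fun a b => rfl]
  norm_num [g0, g1, g2, g3, g4, g5, g6, g7, g8]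
  try simp only [Bool.or_assoc]

set_option maxHeartbeats 400000 in
lemma pvR1 (c0 c1 c2 c3 c4 c5 c6 c7 c8 : Char) (rest : List Char) :
    PySem.List.slice (c0::c1::c2::c3::c4::c5::c6::c7::c8::rest) (some 0) (some 3) = [c0,c1,c2] := by
  rw [PySem.List.slice_toNat _ (by norm_num) (by norm_num)]; rfl

set_option maxHeartbeats 400000 in
lemma pvR2 (c0 c1 c2 c3 c4 c5 c6 c7 c8 : Char) (rest : List Char) :
    PySem.List.slice (c0::c1::c2::c3::c4::c5::c6::c7::c8::rest) (some 3) (some 6) = [c3,c4,c5] := by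
  rw [PySem.List.slice_toNat _ (by norm_num) (by norm_num)]; rfl

set_option maxHeartbeats 400000 in
lemma pvR3 (c0 c1 c2 c3 c4 c5 c6 c7 c8 : Char) (rest : List Char) :
    PySem.List.slice (c0::c1::c2::c3::c4::c5::c6::c7::c8::rest) (some 6) (some 9) = [c6,c7,c8] := by
  rw [PySem.List.slice_toNat _ (by norm_num) (by norm_num)]; rfl

set_option maxHeartbeats 1000000 in
lemma pvS4 (c0 c1 c2 c3 c4 c5 c6 c7 c8 : Char) (rest : List Char) :
    PySem.List.slice? (c0::c1::c2::c3::c4::c5::c6::c7::c8::rest) (some 0) (some 7) 3 = some [c0,c3,c6] := by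
  have hif : ((rest.length : Int) + 1 + 1 + 1 + 1 + 1 + 1 + 1 + 1 + 1) = (rest.length : Int) + 9 := by ring
  have hge : ∀ k : Int, k ≤ 9 → (k ≤ ((rest.length : Int) + 9)) = True := by intro k hk; simp; omega
  have hlt : ∀ k : Int, k < 9 → (k < ((rest.length : Int) + 9)) = True := by intro k hk; simp; omega
  norm_num [hif, hge, hlt, PySem.List.slice?, PySem.List.sliceIndices, PySem.List.clampIdx,
    List.range_succ, min_def, List.filterMap_cons, List.filterMap_nil, show Int.toNat 0 = 0 from rfl, show Int.toNat 1 = 1 from rfl, show Int.toNat 2 = 2 from rfl, show Int.toNat 3 = 3 from rfl, show Int.toNat 4 = 4 from rfl, show Int.toNat 5 = 5 from rfl, show Int.toNat 6 = 6 from rfl, show Int.toNat 7 = 7 from rfl, show Int.toNat 8 = 8 from rfl, show Int.toNat 9 = 9 from rfl]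

set_option maxHeartbeats 1000000 in
lemma pvS5 (c0 c1 c2 c3 c4 c5 c6 c7 c8 : Char) (rest : List Char) :
    PySem.List.slice? (c0::c1::c2::c3::c4::c5::c6::c7::c8::rest) (some 1) (some 8) 3 = some [c1,c4,c7] := by
  have hif : ((rest.length : Int) + 1 + 1 + 1 + 1 + 1 + 1 + 1 + 1 + 1) = (rest.length : Int) + 9 := by ring
  have hge : ∀ k : Int, k ≤ 9 → (k ≤ ((rest.length : Int) + 9)) = True := by intro k hk; simp; omega
  have hlt : ∀ k : Int, k < 9 → (k < ((rest.length : Int) + 9)) = True := by intro k hk; simp; omega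
  norm_num [hif, hge, hlt, PySem.List.slice?, PySem.List.sliceIndices, PySem.List.clampIdx,
    List.range_succ, min_def, List.filterMap_cons, List.filterMap_nil, show Int.toNat 0 = 0 from rfl, show Int.toNat 1 = 1 from rfl, show Int.toNat 2 = 2 from rfl, show Int.toNat 3 = 3 from rfl, show Int.toNat 4 = 4 from rfl, show Int.toNat 5 = 5 from rfl, show Int.toNat 6 = 6 from rfl, show Int.toNat 7 = 7 from rfl, show Int.toNat 8 = 8 from rfl, show Int.toNat 9 = 9 from rfl]

set_option maxHeartbeats 1000000 in
lemma pvS6 (c0 c1 c2 c3 c4 c5 c6 c7 c8 : Char) (rest : List Char) :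
    PySem.List.slice? (c0::c1::c2::c3::c4::c5::c6::c7::c8::rest) (some 2) (some 9) 3 = some [c2,c5,c8] := by
  have hif : ((rest.length : Int) + 1 + 1 + 1 + 1 + 1 + 1 + 1 + 1 + 1) = (rest.length : Int) + 9 := by ring
  have hge : ∀ k : Int, k ≤ 9 → (k ≤ ((rest.length : Int) + 9)) = True := by intro k hk; simp; omega
  have hlt : ∀ k : Int, k < 9 → (k < ((rest.length : Int) + 9)) = True := by intro k hk; simp; omega
  norm_num [hif, hge, hlt, PySem.List.slice?, PySem.List.sliceIndices, PySem.List.clampIdx,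
    List.range_succ, min_def, List.filterMap_cons, List.filterMap_nil, show Int.toNat 0 = 0 from rfl, show Int.toNat 1 = 1 from rfl, show Int.toNat 2 = 2 from rfl, show Int.toNat 3 = 3 from rfl, show Int.toNat 4 = 4 from rfl, show Int.toNat 5 = 5 from rfl, show Int.toNat 6 = 6 from rfl, show Int.toNat 7 = 7 from rfl, show Int.toNat 8 = 8 from rfl, show Int.toNat 9 = 9 from rfl]

set_option maxHeartbeats 1000000 in
lemma pvS7 (c0 c1 c2 c3 c4 c5 c6 c7 c8 : Char) (rest : List Char) :
    PySem.List.slice? (c0::c1::c2::c3::c4::c5::c6::c7::c8::rest) (some 0) (some 9) 4 = some [c0,c4,c8] := by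
  have hif : ((rest.length : Int) + 1 + 1 + 1 + 1 + 1 + 1 + 1 + 1 + 1) = (rest.length : Int) + 9 := by ring
  have hge : ∀ k : Int, k ≤ 9 → (k ≤ ((rest.length : Int) + 9)) = True := by intro k hk; simp; omega
  have hlt : ∀ k : Int, k < 9 → (k < ((rest.length : Int) + 9)) = True := by intro k hk; simp; omega
  norm_num [hif, hge, hlt, PySem.List.slice?, PySem.List.sliceIndices, PySem.List.clampIdx,
    List.range_succ, min_def, List.filterMap_cons, List.filterMap_nil, show Int.toNat 0 = 0 from rfl, show Int.toNat 1 = 1 from rfl, show Int.toNat 2 = 2 from rfl, show Int.toNat 3 = 3 from rfl, show Int.toNat 4 = 4 from rfl, show Int.toNat 5 = 5 from rfl, show Int.toNat 6 = 6 from rfl, show Int.toNat 7 = 7 from rfl, show Int.toNat 8 = 8 from rfl, show Int.toNat 9 = 9 from rfl]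

set_option maxHeartbeats 1000000 in
lemma pvS8 (c0 c1 c2 c3 c4 c5 c6 c7 c8 : Char) (rest : List Char) :
    PySem.List.slice? (c0::c1::c2::c3::c4::c5::c6::c7::c8::rest) (some 2) (some 7) 2 = some [c2,c4,c6] := by
  have hif : ((rest.length : Int) + 1 + 1 + 1 + 1 + 1 + 1 + 1 + 1 + 1) = (rest.length : Int) + 9 := by ring
  have hge : ∀ k : Int, k ≤ 9 → (k ≤ ((rest.length : Int) + 9)) = True := by intro k hk; simp; omega
  have hlt : ∀ k : Int, k < 9 → (k < ((rest.length : Int) + 9)) = True := by intro k hk; simp; omega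
  norm_num [hif, hge, hlt, PySem.List.slice?, PySem.List.sliceIndices, PySem.List.clampIdx,
    List.range_succ, min_def, List.filterMap_cons, List.filterMap_nil, show Int.toNat 0 = 0 from rfl, show Int.toNat 1 = 1 from rfl, show Int.toNat 2 = 2 from rfl, show Int.toNat 3 = 3 from rfl, show Int.toNat 4 = 4 from rfl, show Int.toNat 5 = 5 from rfl, show Int.toNat 6 = 6 from rfl, show Int.toNat 7 = 7 from rfl, show Int.toNat 8 = 8 from rfl, show Int.toNat 9 = 9 from rfl]

-- the heart of the equivalence: on a flattened board of ≥ 9 cells the 8-slice count scan and the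
-- blank-completion scan agree, for any non-blank mark
set_option maxHeartbeats 1600000 in
lemma pvCore_eq (us : Char) (h : us ≠ ' ') (c0 c1 c2 c3 c4 c5 c6 c7 c8 : Char) (rest : List Char) :
    pvACore us (c0::c1::c2::c3::c4::c5::c6::c7::c8::rest) = pvBCore us (c0::c1::c2::c3::c4::c5::c6::c7::c8::rest) := by
  have htail : (PySem.List.enumerate rest 9).any (fun ic =>
      ic.2 == ' ' && pvLines.any (fun l => pvLineMem ic.1 l &&
        pvOthersAll us (c0::c1::c2::c3::c4::c5::c6::c7::c8::rest) ic.1 l)) = false := by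
    rw [List.any_eq_false]
    intro p hp
    obtain ⟨k, hk, rfl⟩ := (PySem.List.mem_enumerate_iff _ _ _).1 hp
    have hno : pvLines.any (fun l => pvLineMem ((9:Int) + k) l &&
        pvOthersAll us (c0::c1::c2::c3::c4::c5::c6::c7::c8::rest) ((9:Int)+k) l) = false := by
      rw [List.any_eq_false]
      intro l hl
      rw [pvLineMem_ge_nine l hl _ (by omega)]
      simp
    simp [hno]
  have hen : PySem.List.enumerate (c0::c1::c2::c3::c4::c5::c6::c7::c8::rest) 0 =
      (0,c0)::(1,c1)::(2,c2)::(3,c3)::(4,c4)::(5,c5)::(6,c6)::(7,c7)::(8,c8)::PySem.List.enumerate rest 9 := by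
    norm_num [PySem.List.enumerate_cons]
  have hB : pvBCore us (c0::c1::c2::c3::c4::c5::c6::c7::c8::rest) =
      (((0:Int),c0)::(1,c1)::(2,c2)::(3,c3)::(4,c4)::(5,c5)::(6,c6)::(7,c7)::(8,c8)::[]).any (fun ic =>
        ic.2 == ' ' && pvLines.any (fun l => pvLineMem ic.1 l &&
          pvOthersAll us (c0::c1::c2::c3::c4::c5::c6::c7::c8::rest) ic.1 l)) := by
    simp only [pvBCore, hen, List.any_cons, List.any_nil, htail]
    try simp
  rw [hB]
  simp only [pvACore, pvR1, pvR2, pvR3, pvS4, pvS5, pvS6, pvS7, pvS8, Option.getD_some,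
    pvRowAlmost_three us _ _ _ h, List.any_cons, List.any_nil,
    pvB0, pvB1, pvB2, pvB3, pvB4, pvB5, pvB6, pvB7, pvB8]
  try simp only [Bool.or_false]
  simp only [Bool.and_or_distrib_left]
  ac_rfl

-- under Pre_ the flattened board has at least 9 cells, so it decomposes as nine cells ++ rest
lemma pvACore_eq_pvBCore_of_len (us : Char) (h : us ≠ ' ') (bf : List Char) (hlen : 9 ≤ bf.length) :
    pvACore us bf = pvBCore us bf := by
  rcases bf with _ | ⟨c0, _ | ⟨c1, _ | ⟨c2, _ | ⟨c3, _ | ⟨c4, _ | ⟨c5, _ | ⟨c6, _ | ⟨c7, _ | ⟨c8, rest⟩⟩⟩⟩⟩⟩⟩⟩⟩ <;>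
    simp_all [List.length] <;> try omega
  exact pvCore_eq us h c0 c1 c2 c3 c4 c5 c6 c7 c8 rest

-- ===== VERDICT =====
theorem about_to_win_spec : Claim_equal_about_to_win := by
  intro board_exc cur_player _hdom hpre
  unfold Spec_about_to_win
  obtain ⟨h1, h2, hlen⟩ := hpre
  have hlen' : 9 ≤ (pvFlat board_exc).length := by rw [pvFlat_length]; exact hlen
  obtain h | h | h | h : cur_player = -1 ∨ cur_player = 0 ∨ cur_player = 1 ∨ cur_player = 2 := by omega
  · subst h
    have hx : PySem.Str.pyGet? "xo" (-1 - 1) = some 'x' := by decide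
    simp only [about_to_win, about_to_win_alt, hx]
    exact pvACore_eq_pvBCore_of_len 'x' (by decide) _ hlen'
  · subst h
    have hx : PySem.Str.pyGet? "xo" ((0:Int) - 1) = some 'o' := by decide
    simp only [about_to_win, about_to_win_alt, hx]
    exact pvACore_eq_pvBCore_of_len 'o' (by decide) _ hlen'
  · subst h
    have hx : PySem.Str.pyGet? "xo" ((1:Int) - 1) = some 'x' := by decide
    simp only [about_to_win, about_to_win_alt, hx]
    exact pvACore_eq_pvBCore_of_len 'x' (by decide) _ hlen'
  · subst h
    have hx : PySem.Str.pyGet? "xo" ((2:Int) - 1) = some 'o' := by decide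
    simp only [about_to_win, about_to_win_alt, hx]
    exact pvACore_eq_pvBCore_of_len 'o' (by decide) _ hlen'
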